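-- pv_equiv track=rewrite | github.com/UNDP-Data/rapida | rapida/components/landuse/search_utils/tiles.py | build_queen_adjacency_ragged
-- ===== SOURCE A (Python) =====
-- from typing import Dict, List, Tuple, Optional, Iterable
--
-- def build_queen_adjacency_ragged(grid_ids: List[List[str]]) -> Dict[str, List[str]]:
--     """Queen adjacency for ragged grids (rows may have different lengths)."""
--     import itertools
--     adj: Dict[str, List[str]] = {}
--     H = len(grid_ids)
--
--     # register nodes
--     for r in range(H):
--         for c in range(len(grid_ids[r])):
--             a = grid_ids[r][c]
--             adj.setdefault(a, [])
--
--     # connect neighbors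
--     seen = set()
--     for r in range(H):
--         for c in range(len(grid_ids[r])):
--             a = grid_ids[r][c]
--             for dr, dc in itertools.product([-1,0,1], [-1,0,1]):
--                 if dr == 0 and dc == 0:
--                     continue
--                 rr, cc = r+dr, c+dc
--                 if 0 <= rr < H and 0 <= cc < len(grid_ids[rr]):
--                     b = grid_ids[rr][cc]
--                     if a == b:
--                         continue
--                     if (a, b) in seen or (b, a) in seen:
--                         continue
--                     adj[a].append(b)
--                     adj[b].append(a)
--                     seen.add((a, b))
--     # optional: sort neighbors for determinism
--     for k in adj:
--         adj[k] = sorted(set(adj[k]))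
--     return adj
-- ===== SOURCE B (Python) =====
-- from typing import Dict, List
--
--
-- def build_queen_adjacency_ragged(grid_ids: List[List[str]]) -> Dict[str, List[str]]:
--     """Queen adjacency for ragged grids (rows may have different lengths)."""
--     adj: Dict[str, List[str]] = {}
--     H = len(grid_ids)
--
--     # register nodes
--     for row in grid_ids:
--         for a in row:
--             adj.setdefault(a, [])
--
--     # connect neighbors: look only at the forward half of the queen
--     # neighborhood, recording each adjacent pair from both sides; the
--     # closing sorted(set(...)) removes duplicates from repeated ids.
--     for r in range(H):
--         for c in range(len(grid_ids[r])):
--             a = grid_ids[r][c]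
--             for dr, dc in ((0, 1), (1, -1), (1, 0), (1, 1)):
--                 rr, cc = r + dr, c + dc
--                 if 0 <= rr < H and 0 <= cc < len(grid_ids[rr]):
--                     b = grid_ids[rr][cc]
--                     if a != b:
--                         adj[a].append(b)
--                         adj[b].append(a)
--
--     return {k: sorted(set(v)) for k, v in adj.items()}
-- ===== Notes on version B (the rewrite author's own statement) =====
-- stated objective: simpler
-- what changed: The 8-offset scan with an edge-dedup 'seen' set is replaced by a forward-half traversal (offsets (0,1),(1,-1),(1,0),(1,1)) that records each adjacent pair once from both sides with no seen-set, relying on the final sorted(set(...)) for dedup; registration iterates rows directly.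
import Mathlib
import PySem

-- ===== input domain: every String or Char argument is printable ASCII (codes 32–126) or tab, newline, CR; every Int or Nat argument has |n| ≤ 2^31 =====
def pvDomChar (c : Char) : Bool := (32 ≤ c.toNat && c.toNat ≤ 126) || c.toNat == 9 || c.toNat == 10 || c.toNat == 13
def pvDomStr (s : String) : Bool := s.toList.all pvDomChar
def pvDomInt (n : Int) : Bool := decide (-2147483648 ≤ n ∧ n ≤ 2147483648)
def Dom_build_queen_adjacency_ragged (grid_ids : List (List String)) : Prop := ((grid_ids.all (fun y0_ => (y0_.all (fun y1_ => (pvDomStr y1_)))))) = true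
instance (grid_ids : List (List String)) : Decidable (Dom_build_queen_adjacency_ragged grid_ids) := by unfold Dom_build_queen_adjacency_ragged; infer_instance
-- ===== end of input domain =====

-- B replaces A's 8-offset scan with a 'seen' edge-dedup set by a forward-half
-- traversal (4 offsets, each adjacent pair recorded once from both sides, no seen-set),
-- leaving deduplication to the closing sorted(set(...)); objective: simpler.

-- ===== PORT A =====
-- itertools.product([-1,0,1], [-1,0,1]) evaluates to this literal list of 9 pairs
def pvOffsets9 : List (Int × Int) :=
  [(-1, -1), (-1, 0), (-1, 1), (0, -1), (0, 0), (0, 1), (1, -1), (1, 0), (1, 1)]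

def build_queen_adjacency_ragged (grid_ids : List (List String)) : List (String × List String) :=
  let H : Int := PySem.List.len grid_ids
  -- register nodes
  let adj : PySem.Dict String (List String) :=
    (PySem.List.pyRange 0 H).foldl (fun adj r =>
      (PySem.List.pyRange 0 (PySem.List.len (PySem.List.pyGetD grid_ids r []))).foldl (fun adj c =>
        adj.setdefault (PySem.List.pyGetD (PySem.List.pyGetD grid_ids r []) c "") []) adj)
      PySem.Dict.empty
  -- connect neighbors, with the 'seen' set of id pairs
  let st : PySem.Dict String (List String) × PySem.Set (String × String) :=
    (PySem.List.pyRange 0 H).foldl (fun st r =>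
      (PySem.List.pyRange 0 (PySem.List.len (PySem.List.pyGetD grid_ids r []))).foldl (fun st c =>
        pvOffsets9.foldl (fun st p =>
          if p.1 = 0 ∧ p.2 = 0 then st
          else if 0 ≤ r + p.1 ∧ r + p.1 < H ∧ 0 ≤ c + p.2 ∧
              c + p.2 < PySem.List.len (PySem.List.pyGetD grid_ids (r + p.1) []) then
            if PySem.List.pyGetD (PySem.List.pyGetD grid_ids r []) c "" =
                PySem.List.pyGetD (PySem.List.pyGetD grid_ids (r + p.1) []) (c + p.2) "" then st
            else if st.2.contains (PySem.List.pyGetD (PySem.List.pyGetD grid_ids r []) c "",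
                  PySem.List.pyGetD (PySem.List.pyGetD grid_ids (r + p.1) []) (c + p.2) "") = true ∨
                st.2.contains (PySem.List.pyGetD (PySem.List.pyGetD grid_ids (r + p.1) []) (c + p.2) "",
                  PySem.List.pyGetD (PySem.List.pyGetD grid_ids r []) c "") = true then st
            else
              ((st.1.modify (PySem.List.pyGetD (PySem.List.pyGetD grid_ids r []) c "") []
                  (· ++ [PySem.List.pyGetD (PySem.List.pyGetD grid_ids (r + p.1) []) (c + p.2) ""])).modify
                  (PySem.List.pyGetD (PySem.List.pyGetD grid_ids (r + p.1) []) (c + p.2) "") []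
                  (· ++ [PySem.List.pyGetD (PySem.List.pyGetD grid_ids r []) c ""]),
                st.2.add (PySem.List.pyGetD (PySem.List.pyGetD grid_ids r []) c "",
                  PySem.List.pyGetD (PySem.List.pyGetD grid_ids (r + p.1) []) (c + p.2) ""))
          else st) st) st)
      (adj, (PySem.Set.empty : PySem.Set (String × String)))
  -- for k in adj: adj[k] = sorted(set(adj[k]))  — value update in place, key order kept
  st.1.items.map (fun p => (p.1, PySem.List.sorted (PySem.Set.ofList p.2) (fun x => x)))

-- ===== PORT B =====
def pvOffsets4 : List (Int × Int) := [(0, 1), (1, -1), (1, 0), (1, 1)]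

def build_queen_adjacency_ragged_alt (grid_ids : List (List String)) : List (String × List String) :=
  let H : Int := PySem.List.len grid_ids
  -- register nodes, iterating rows directly
  let adj : PySem.Dict String (List String) :=
    grid_ids.foldl (fun adj row => row.foldl (fun adj a => adj.setdefault a []) adj) PySem.Dict.empty
  -- forward-half traversal: record each adjacent pair once, from both sides
  let adj : PySem.Dict String (List String) :=
    (PySem.List.pyRange 0 H).foldl (fun adj r =>
      (PySem.List.pyRange 0 (PySem.List.len (PySem.List.pyGetD grid_ids r []))).foldl (fun adj c =>
        pvOffsets4.foldl (fun adj p =>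
          if 0 ≤ r + p.1 ∧ r + p.1 < H ∧ 0 ≤ c + p.2 ∧
              c + p.2 < PySem.List.len (PySem.List.pyGetD grid_ids (r + p.1) []) then
            if PySem.List.pyGetD (PySem.List.pyGetD grid_ids r []) c "" ≠
                PySem.List.pyGetD (PySem.List.pyGetD grid_ids (r + p.1) []) (c + p.2) "" then
              (adj.modify (PySem.List.pyGetD (PySem.List.pyGetD grid_ids r []) c "") []
                  (· ++ [PySem.List.pyGetD (PySem.List.pyGetD grid_ids (r + p.1) []) (c + p.2) ""])).modify
                (PySem.List.pyGetD (PySem.List.pyGetD grid_ids (r + p.1) []) (c + p.2) "") []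
                (· ++ [PySem.List.pyGetD (PySem.List.pyGetD grid_ids r []) c ""])
            else adj
          else adj) adj) adj) adj
  -- {k: sorted(set(v)) for k, v in adj.items()}  — keys are distinct, order kept
  adj.items.map (fun p => (p.1, PySem.List.sorted (PySem.Set.ofList p.2) (fun x => x)))

-- ===== PRECONDITION & SPEC =====
def Spec_build_queen_adjacency_ragged (grid_ids : List (List String)) (out : List (String × List String)) : Prop := out = build_queen_adjacency_ragged_alt grid_ids
instance (grid_ids : List (List String)) (out : List (String × List String)) : Decidable (Spec_build_queen_adjacency_ragged grid_ids out) := by unfold Spec_build_queen_adjacency_ragged; infer_instance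

-- ===== CLAIM (what is proved, stated in full; the proofs are below) =====
def Claim_equal_build_queen_adjacency_ragged : Prop := ∀ (grid_ids : List (List String)), Dom_build_queen_adjacency_ragged grid_ids → Spec_build_queen_adjacency_ragged grid_ids (build_queen_adjacency_ragged grid_ids)

-- ===== LEMMAS AND PROOFS =====

-- abbreviations for the grid geometry
def pvRow (g : List (List String)) (r : Int) : List String := PySem.List.pyGetD g r []
def pvCell (g : List (List String)) (r c : Int) : String := PySem.List.pyGetD (pvRow g r) c ""
def pvSrc (g : List (List String)) (r c : Int) : Prop :=
  0 ≤ r ∧ r < PySem.List.len g ∧ 0 ≤ c ∧ c < PySem.List.len (pvRow g r)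

-- effect of one scan step (r, c, dr, dc): the ordered id pair it connects, if any
def pvEff (g : List (List String)) (s : Int × Int × Int × Int) : Option (String × String) :=
  if s.2.2.1 = 0 ∧ s.2.2.2 = 0 then none
  else if 0 ≤ s.1 + s.2.2.1 ∧ s.1 + s.2.2.1 < PySem.List.len g ∧ 0 ≤ s.2.1 + s.2.2.2 ∧
      s.2.1 + s.2.2.2 < PySem.List.len (pvRow g (s.1 + s.2.2.1)) then
    if pvCell g s.1 s.2.1 = pvCell g (s.1 + s.2.2.1) (s.2.1 + s.2.2.2) then none
    else some (pvCell g s.1 s.2.1, pvCell g (s.1 + s.2.2.1) (s.2.1 + s.2.2.2))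
  else none

-- the adjacency relation realised by a given offset list
def pvDir (g : List (List String)) (offs : List (Int × Int)) (a b : String) : Prop :=
  ∃ r c dr dc, pvSrc g r c ∧ (dr, dc) ∈ offs ∧ pvEff g (r, c, dr, dc) = some (a, b)

-- flattened step list of the nested scan loops
def pvSteps (g : List (List String)) (offs : List (Int × Int)) : List (Int × Int × Int × Int) :=
  (PySem.List.pyRange 0 (PySem.List.len g)).flatMap (fun r =>
    (PySem.List.pyRange 0 (PySem.List.len (pvRow g r))).flatMap (fun c =>
      offs.map (fun p => (r, c, p.1, p.2))))

-- one step of A's connection loop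
def pvStepA (g : List (List String))
    (st : PySem.Dict String (List String) × PySem.Set (String × String))
    (s : Int × Int × Int × Int) :
    PySem.Dict String (List String) × PySem.Set (String × String) :=
  if s.2.2.1 = 0 ∧ s.2.2.2 = 0 then st
  else if 0 ≤ s.1 + s.2.2.1 ∧ s.1 + s.2.2.1 < PySem.List.len g ∧ 0 ≤ s.2.1 + s.2.2.2 ∧
      s.2.1 + s.2.2.2 < PySem.List.len (pvRow g (s.1 + s.2.2.1)) then
    if pvCell g s.1 s.2.1 = pvCell g (s.1 + s.2.2.1) (s.2.1 + s.2.2.2) then st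
    else if st.2.contains (pvCell g s.1 s.2.1, pvCell g (s.1 + s.2.2.1) (s.2.1 + s.2.2.2)) = true ∨
        st.2.contains (pvCell g (s.1 + s.2.2.1) (s.2.1 + s.2.2.2), pvCell g s.1 s.2.1) = true then st
    else
      ((st.1.modify (pvCell g s.1 s.2.1) [] (· ++ [pvCell g (s.1 + s.2.2.1) (s.2.1 + s.2.2.2)])).modify
          (pvCell g (s.1 + s.2.2.1) (s.2.1 + s.2.2.2)) [] (· ++ [pvCell g s.1 s.2.1]),
        st.2.add (pvCell g s.1 s.2.1, pvCell g (s.1 + s.2.2.1) (s.2.1 + s.2.2.2)))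
  else st

-- one step of B's connection loop
def pvStepB (g : List (List String)) (adj : PySem.Dict String (List String))
    (s : Int × Int × Int × Int) : PySem.Dict String (List String) :=
  if 0 ≤ s.1 + s.2.2.1 ∧ s.1 + s.2.2.1 < PySem.List.len g ∧ 0 ≤ s.2.1 + s.2.2.2 ∧
      s.2.1 + s.2.2.2 < PySem.List.len (pvRow g (s.1 + s.2.2.1)) then
    if pvCell g s.1 s.2.1 ≠ pvCell g (s.1 + s.2.2.1) (s.2.1 + s.2.2.2) then
      (adj.modify (pvCell g s.1 s.2.1) [] (· ++ [pvCell g (s.1 + s.2.2.1) (s.2.1 + s.2.2.2)])).modify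
        (pvCell g (s.1 + s.2.2.1) (s.2.1 + s.2.2.2)) [] (· ++ [pvCell g s.1 s.2.1])
    else adj
  else adj

-- B's registration dict (A's registration loop computes the same dict, see pvRegA_eq)
def pvReg (g : List (List String)) : PySem.Dict String (List String) :=
  g.foldl (fun adj row => row.foldl (fun adj a => adj.setdefault a []) adj) PySem.Dict.empty


lemma pvRegA_eq (g : List (List String)) :
    (PySem.List.pyRange 0 (PySem.List.len g)).foldl (fun adj r =>
      (PySem.List.pyRange 0 (PySem.List.len (PySem.List.pyGetD g r []))).foldl (fun adj c =>
        adj.setdefault (PySem.List.pyGetD (PySem.List.pyGetD g r []) c "") []) adj)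
      (PySem.Dict.empty : PySem.Dict String (List String)) = pvReg g := by
  unfold pvReg
  rw [show (PySem.List.len g) = ((g.length : Int)) from rfl]
  rw [PySem.List.foldl_pyRange_zero_pyGetD' g []
    (fun adj row => (PySem.List.pyRange 0 (PySem.List.len row)).foldl
      (fun adj c => adj.setdefault (PySem.List.pyGetD row c "") []) adj) PySem.Dict.empty]
  apply PySem.List.foldl_congr_mem
  intro adj row _
  rw [show (PySem.List.len row) = ((row.length : Int)) from rfl]
  exact PySem.List.foldl_pyRange_zero_pyGetD' row "" (fun adj a => adj.setdefault a []) adj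

lemma pvSteps_foldlA (g : List (List String))
    (init : PySem.Dict String (List String) × PySem.Set (String × String)) :
    (pvSteps g pvOffsets9).foldl (pvStepA g) init =
    (PySem.List.pyRange 0 (PySem.List.len g)).foldl (fun st r =>
      (PySem.List.pyRange 0 (PySem.List.len (pvRow g r))).foldl (fun st c =>
        pvOffsets9.foldl (fun st p => pvStepA g st (r, c, p.1, p.2)) st) st) init := by
  simp [pvSteps, List.foldl_flatMap, List.foldl_map]

lemma pvSteps_foldlB (g : List (List String)) (init : PySem.Dict String (List String)) :
    (pvSteps g pvOffsets4).foldl (pvStepB g) init =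
    (PySem.List.pyRange 0 (PySem.List.len g)).foldl (fun adj r =>
      (PySem.List.pyRange 0 (PySem.List.len (pvRow g r))).foldl (fun adj c =>
        pvOffsets4.foldl (fun adj p => pvStepB g adj (r, c, p.1, p.2)) adj) adj) init := by
  simp [pvSteps, List.foldl_flatMap, List.foldl_map]

-- registration dict: keys, lookups, membership
lemma pvReg_flat (g : List (List String)) :
    pvReg g = g.flatten.foldl (fun adj a => adj.setdefault a []) PySem.Dict.empty := by
  unfold pvReg
  rw [List.foldl_flatten]

lemma pvSetdefault_getD (d : PySem.Dict String (List String)) (a k : String) :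
    (d.setdefault a []).getD k [] = d.getD k [] := by
  by_cases h : k = a
  · subst h; rw [PySem.Dict.getD_setdefault_self]
  · rw [PySem.Dict.getD_eq_get?_getD, PySem.Dict.get?_setdefault_of_ne d [] h,
      PySem.Dict.getD_eq_get?_getD]

lemma pvFoldl_setdefault_getD (l : List String) (d : PySem.Dict String (List String)) (k : String) :
    (l.foldl (fun adj a => adj.setdefault a []) d).getD k [] = d.getD k [] := by
  induction l generalizing d with
  | nil => rfl
  | cons a l ih => simp only [List.foldl_cons]; rw [ih, pvSetdefault_getD]

lemma pvFoldl_setdefault_contains (l : List String) (d : PySem.Dict String (List String)) (k : String) :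
    (l.foldl (fun adj a => adj.setdefault a []) d).contains k = true ↔ k ∈ l ∨ d.contains k = true := by
  induction l generalizing d with
  | nil => simp
  | cons a l ih =>
    simp only [List.foldl_cons, List.mem_cons]
    rw [ih]
    rw [show ∀ d' : PySem.Dict String (List String), (d'.setdefault a []).contains k = (k == a || d'.contains k) from fun d' => PySem.Dict.contains_setdefault d' a k []]
    simp [Bool.or_eq_true, beq_iff_eq]
    tauto

lemma pvFoldl_setdefault_nodup (l : List String) (d : PySem.Dict String (List String))
    (h : d.keys.Nodup) : (l.foldl (fun adj a => adj.setdefault a []) d).keys.Nodup := by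
  induction l generalizing d with
  | nil => exact h
  | cons a l ih =>
    simp only [List.foldl_cons]
    apply ih
    rw [PySem.Dict.keys_setdefault]
    split_ifs with hc
    · exact h
    · rw [List.nodup_append]
      refine ⟨h, List.nodup_singleton a, ?_⟩
      intro x hx y hy
      rw [List.mem_singleton] at hy
      subst hy
      rintro rfl
      rw [PySem.Dict.contains_eq_decide_mem_keys] at hc
      simp at hc
      exact hc hx

lemma pvReg_nodup (g : List (List String)) : (pvReg g).keys.Nodup := by
  rw [pvReg_flat]
  exact pvFoldl_setdefault_nodup _ _ (by simp [PySem.Dict.keys_empty])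

lemma pvReg_getD (g : List (List String)) (k : String) : (pvReg g).getD k [] = [] := by
  rw [pvReg_flat, pvFoldl_setdefault_getD, PySem.Dict.getD_empty]

lemma pvCell_mem_flatten (g : List (List String)) (r c : Int) (h : pvSrc g r c) :
    pvCell g r c ∈ g.flatten := by
  obtain ⟨h0, h1, h2, h3⟩ := h
  rw [show PySem.List.len g = ((g.length : Int)) from rfl] at h1
  unfold pvCell pvRow at *
  rw [PySem.List.pyGetD_eq_getElem g [] h0 h1] at *
  rw [show PySem.List.len g[r.toNat] = ((g[r.toNat].length : Int)) from rfl] at h3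
  rw [PySem.List.pyGetD_eq_getElem _ "" h2 h3]
  exact List.mem_flatten.2 ⟨g[r.toNat], List.getElem_mem _, List.getElem_mem _⟩

lemma pvReg_contains (g : List (List String)) (r c : Int) (h : pvSrc g r c) :
    (pvReg g).contains (pvCell g r c) = true := by
  rw [pvReg_flat]
  exact (pvFoldl_setdefault_contains _ _ _).2 (Or.inl (pvCell_mem_flatten g r c h))

-- pvEff facts
lemma pvEff_swap (g : List (List String)) (r c dr dc : Int) (a b : String)
    (hs : pvSrc g r c) (he : pvEff g (r, c, dr, dc) = some (a, b)) :
    pvSrc g (r + dr) (c + dc) ∧ pvEff g (r + dr, c + dc, -dr, -dc) = some (b, a) := by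
  unfold pvEff at he
  simp only at he
  split_ifs at he with h0 h1 h2
  injection he with he'
  injection he' with hea heb
  refine ⟨h1, ?_⟩
  unfold pvEff
  simp only
  rw [show r + dr + -dr = r from by ring, show c + dc + -dc = c from by ring]
  rw [if_neg (by omega), if_pos (show (0:Int) ≤ r ∧ _ from hs), if_neg (fun hq => h2 hq.symm)]
  rw [hea, heb]

-- the step effect determines A's step
lemma pvStepA_none (g : List (List String))
    (st : PySem.Dict String (List String) × PySem.Set (String × String))
    (s : Int × Int × Int × Int) (h : pvEff g s = none) : pvStepA g st s = st := by
  unfold pvEff at h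
  unfold pvStepA
  split_ifs at h ⊢ <;> rfl

lemma pvStepA_some (g : List (List String))
    (st : PySem.Dict String (List String) × PySem.Set (String × String))
    (s : Int × Int × Int × Int) (a b : String) (h : pvEff g s = some (a, b)) :
    pvStepA g st s =
      if st.2.contains (a, b) = true ∨ st.2.contains (b, a) = true then st
      else ((st.1.modify a [] (· ++ [b])).modify b [] (· ++ [a]), st.2.add (a, b)) := by
  unfold pvEff at h
  split_ifs at h with h0 h1 h2
  injection h with h'
  injection h' with hea heb
  subst hea; subst heb
  unfold pvStepA
  rw [if_neg h0, if_pos h1, if_neg h2]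

lemma pvStepB_none (g : List (List String)) (adj : PySem.Dict String (List String))
    (s : Int × Int × Int × Int) (hz : ¬ (s.2.2.1 = 0 ∧ s.2.2.2 = 0))
    (h : pvEff g s = none) : pvStepB g adj s = adj := by
  unfold pvEff at h
  rw [if_neg hz] at h
  unfold pvStepB
  split_ifs at h ⊢ <;> rfl

lemma pvStepB_some (g : List (List String)) (adj : PySem.Dict String (List String))
    (s : Int × Int × Int × Int) (a b : String) (hz : ¬ (s.2.2.1 = 0 ∧ s.2.2.2 = 0))
    (h : pvEff g s = some (a, b)) :
    pvStepB g adj s = (adj.modify a [] (· ++ [b])).modify b [] (· ++ [a]) := by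
  unfold pvEff at h
  rw [if_neg hz] at h
  split_ifs at h with h1 h2
  injection h with h'
  injection h' with hea heb
  subst hea; subst heb
  unfold pvStepB
  rw [if_pos h1, if_pos h2]

-- pvEff gives strings that are registered keys, and distinct components
lemma pvEff_src_keys (g : List (List String)) (s : Int × Int × Int × Int) (a b : String)
    (hs : pvSrc g s.1 s.2.1) (h : pvEff g s = some (a, b)) :
    (pvReg g).contains a = true ∧ (pvReg g).contains b = true ∧ a ≠ b := by
  unfold pvEff at h
  split_ifs at h with h0 h1 h2
  injection h with h'
  injection h' with hea heb
  subst hea; subst heb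
  exact ⟨pvReg_contains g _ _ hs, pvReg_contains g _ _ h1, h2⟩

-- invariants
def pvInvA (g : List (List String))
    (st : PySem.Dict String (List String) × PySem.Set (String × String))
    (D : String → String → Prop) : Prop :=
  st.1.keys = (pvReg g).keys ∧
  (∀ a b, (a, b) ∈ st.2 → D a b) ∧
  (∀ a b, D a b → (a, b) ∈ st.2 ∨ (b, a) ∈ st.2) ∧
  (∀ k x, x ∈ st.1.getD k [] ↔ D k x ∨ D x k)

def pvInvB (g : List (List String)) (adj : PySem.Dict String (List String))
    (D : String → String → Prop) : Prop :=
  adj.keys = (pvReg g).keys ∧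
  (∀ k x, x ∈ adj.getD k [] ↔ D k x ∨ D x k)

lemma pvInvA_congr (g : List (List String)) st (D D' : String → String → Prop)
    (h : ∀ a b, D a b ↔ D' a b) (hi : pvInvA g st D) : pvInvA g st D' := by
  obtain ⟨h1, h2, h3, h4⟩ := hi
  exact ⟨h1, fun a b hm => (h a b).1 (h2 a b hm),
    fun a b hd => h3 a b ((h a b).2 hd),
    fun k x => by rw [h4 k x, h k x, h x k]⟩

lemma pvInvB_congr (g : List (List String)) adj (D D' : String → String → Prop)
    (h : ∀ a b, D a b ↔ D' a b) (hi : pvInvB g adj D) : pvInvB g adj D' := by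
  obtain ⟨h1, h2⟩ := hi
  exact ⟨h1, fun k x => by rw [h2 k x, h k x, h x k]⟩

-- appending one edge (a, b), a ≠ b, both keys present
lemma pvAppend_edge (g : List (List String)) (adj : PySem.Dict String (List String))
    (a b : String) (hk : adj.keys = (pvReg g).keys)
    (ha : (pvReg g).contains a = true) (hb : (pvReg g).contains b = true) (hab : a ≠ b) :
    ((adj.modify a [] (· ++ [b])).modify b [] (· ++ [a])).keys = (pvReg g).keys ∧
    (∀ k x, x ∈ ((adj.modify a [] (· ++ [b])).modify b [] (· ++ [a])).getD k [] ↔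
      x ∈ adj.getD k [] ∨ (k = a ∧ x = b) ∨ (k = b ∧ x = a)) := by
  have hca : adj.contains a = true := by
    rw [PySem.Dict.contains_eq_decide_mem_keys, hk]
    rw [PySem.Dict.contains_eq_decide_mem_keys] at ha
    exact ha
  have hcb : adj.contains b = true := by
    rw [PySem.Dict.contains_eq_decide_mem_keys, hk]
    rw [PySem.Dict.contains_eq_decide_mem_keys] at hb
    exact hb
  constructor
  · rw [PySem.Dict.keys_modify, PySem.Dict.keys_insert_of_contains, PySem.Dict.keys_modify,
      PySem.Dict.keys_insert_of_contains, hk]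
    · exact hca
    · rw [PySem.Dict.contains_modify]
      simp [hcb]
  · intro k x
    rw [PySem.Dict.getD_modify]
    by_cases h1 : k = b
    · subst h1
      rw [if_pos rfl, PySem.Dict.getD_modify, if_neg (fun q => hab q.symm)]
      simp only [List.mem_append, List.mem_singleton]
      constructor
      · rintro (hm | rfl) <;> tauto
      · rintro (hm | ⟨rfl, rfl⟩ | ⟨_, rfl⟩) <;> tauto
    · rw [if_neg h1, PySem.Dict.getD_modify]
      by_cases h2 : k = a
      · subst h2
        rw [if_pos rfl]
        simp only [List.mem_append, List.mem_singleton]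
        constructor
        · rintro (hm | rfl) <;> tauto
        · rintro (hm | ⟨_, rfl⟩ | ⟨rfl, rfl⟩) <;> tauto
      · rw [if_neg h2]
        constructor
        · tauto
        · rintro (hm | ⟨rfl, _⟩ | ⟨rfl, _⟩) <;> tauto

-- one step preserves the invariants, extending D by the step's effect
lemma pvInvA_step (g : List (List String)) st (D : String → String → Prop)
    (s : Int × Int × Int × Int) (hs : pvSrc g s.1 s.2.1) (hi : pvInvA g st D) :
    pvInvA g (pvStepA g st s) (fun a b => D a b ∨ pvEff g s = some (a, b)) := by
  obtain ⟨h1, h2, h3, h4⟩ := hi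
  cases he : pvEff g s with
  | none =>
    rw [pvStepA_none g st s he]
    apply pvInvA_congr g st D _ _ ⟨h1, h2, h3, h4⟩
    intro a b
    simp
  | some ab =>
    obtain ⟨a, b⟩ := ab
    obtain ⟨hka, hkb, hab⟩ := pvEff_src_keys g s a b hs he
    refine pvInvA_congr g _ (fun x y => D x y ∨ (x = a ∧ y = b)) _
      (fun x y => by simp [eq_comm]) ?_
    rw [pvStepA_some g st s a b he]
    split_ifs with hseen
    · have hseen' : D a b ∨ D b a := by
        rcases hseen with hseen | hseen
        · exact Or.inl (h2 _ _ ((PySem.Set.contains_iff _ _).1 hseen))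
        · exact Or.inr (h2 _ _ ((PySem.Set.contains_iff _ _).1 hseen))
      refine ⟨h1, ?_, ?_, ?_⟩
      · intro x y hm
        exact Or.inl (h2 x y hm)
      · rintro x y (hd | ⟨rfl, rfl⟩)
        · exact h3 x y hd
        · rcases hseen with hseen | hseen
          · exact Or.inl ((PySem.Set.contains_iff _ _).1 hseen)
          · exact Or.inr ((PySem.Set.contains_iff _ _).1 hseen)
      · intro k x
        rw [h4 k x]
        constructor
        · tauto
        · rintro ((hd | ⟨rfl, rfl⟩) | (hd | ⟨rfl, rfl⟩)) <;> tauto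
    · obtain ⟨hkeys, hmem⟩ := pvAppend_edge g st.1 a b h1 hka hkb hab
      refine ⟨hkeys, ?_, ?_, ?_⟩
      · intro x y hm
        rw [PySem.Set.mem_add] at hm
        rcases hm with hm | hm
        · exact Or.inl (h2 x y hm)
        · exact Or.inr ⟨congrArg Prod.fst hm, congrArg Prod.snd hm⟩
      · rintro x y (hd | ⟨rfl, rfl⟩)
        · rcases h3 x y hd with hm | hm
          · exact Or.inl ((PySem.Set.mem_add _ _ _).2 (Or.inl hm))
          · exact Or.inr ((PySem.Set.mem_add _ _ _).2 (Or.inl hm))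
        · exact Or.inl ((PySem.Set.mem_add _ _ _).2 (Or.inr rfl))
      · intro k x
        rw [hmem k x, h4 k x]
        constructor
        · rintro ((hd | hd) | ⟨rfl, rfl⟩ | ⟨rfl, rfl⟩) <;> tauto
        · rintro ((hd | ⟨rfl, rfl⟩) | (hd | ⟨rfl, rfl⟩)) <;> tauto

lemma pvInvB_step (g : List (List String)) adj (D : String → String → Prop)
    (s : Int × Int × Int × Int) (hs : pvSrc g s.1 s.2.1)
    (hz : ¬ (s.2.2.1 = 0 ∧ s.2.2.2 = 0)) (hi : pvInvB g adj D) :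
    pvInvB g (pvStepB g adj s) (fun a b => D a b ∨ pvEff g s = some (a, b)) := by
  obtain ⟨h1, h4⟩ := hi
  cases he : pvEff g s with
  | none =>
    rw [pvStepB_none g adj s hz he]
    apply pvInvB_congr g adj D _ _ ⟨h1, h4⟩
    intro a b
    simp
  | some ab =>
    obtain ⟨a, b⟩ := ab
    obtain ⟨hka, hkb, hab⟩ := pvEff_src_keys g s a b hs he
    refine pvInvB_congr g _ (fun x y => D x y ∨ (x = a ∧ y = b)) _
      (fun x y => by simp [eq_comm]) ?_
    rw [pvStepB_some g adj s a b hz he]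
    obtain ⟨hkeys, hmem⟩ := pvAppend_edge g adj a b h1 hka hkb hab
    refine ⟨hkeys, ?_⟩
    intro k x
    rw [hmem k x, h4 k x]
    constructor
    · rintro ((hd | hd) | ⟨rfl, rfl⟩ | ⟨rfl, rfl⟩) <;> tauto
    · rintro ((hd | ⟨rfl, rfl⟩) | (hd | ⟨rfl, rfl⟩)) <;> tauto

-- folding a step list
lemma pvInvA_foldl (g : List (List String)) (P : List (Int × Int × Int × Int)) :
    ∀ st (D : String → String → Prop), pvInvA g st D →
    (∀ s ∈ P, pvSrc g s.1 s.2.1) →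
    pvInvA g (P.foldl (pvStepA g) st) (fun a b => D a b ∨ ∃ s ∈ P, pvEff g s = some (a, b)) := by
  induction P with
  | nil =>
    intro st D hi _
    apply pvInvA_congr g st D _ _ hi
    simp
  | cons s P ih =>
    intro st D hi hsrc
    simp only [List.foldl_cons]
    have h1 := pvInvA_step g st D s (hsrc s (by simp)) hi
    have h2 := ih _ _ h1 (fun t ht => hsrc t (List.mem_cons_of_mem s ht))
    apply pvInvA_congr g _ _ _ _ h2
    intro a b
    rw [List.exists_mem_cons_iff]
    tauto

lemma pvInvB_foldl (g : List (List String)) (P : List (Int × Int × Int × Int)) :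
    ∀ adj (D : String → String → Prop), pvInvB g adj D →
    (∀ s ∈ P, pvSrc g s.1 s.2.1) →
    (∀ s ∈ P, ¬ (s.2.2.1 = 0 ∧ s.2.2.2 = 0)) →
    pvInvB g (P.foldl (pvStepB g) adj) (fun a b => D a b ∨ ∃ s ∈ P, pvEff g s = some (a, b)) := by
  induction P with
  | nil =>
    intro adj D hi _ _
    apply pvInvB_congr g adj D _ _ hi
    simp
  | cons s P ih =>
    intro adj D hi hsrc hz
    simp only [List.foldl_cons]
    have h1 := pvInvB_step g adj D s (hsrc s (by simp)) (hz s (by simp)) hi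
    have h2 := ih _ _ h1 (fun t ht => hsrc t (List.mem_cons_of_mem s ht))
      (fun t ht => hz t (List.mem_cons_of_mem s ht))
    apply pvInvB_congr g _ _ _ _ h2
    intro a b
    rw [List.exists_mem_cons_iff]
    tauto

-- membership in the flattened step lists
lemma pvMem_steps (g : List (List String)) (offs : List (Int × Int))
    (s : Int × Int × Int × Int) :
    s ∈ pvSteps g offs ↔ pvSrc g s.1 s.2.1 ∧ s.2.2 ∈ offs := by
  obtain ⟨r, c, dr, dc⟩ := s
  simp only [pvSteps, List.mem_flatMap, List.mem_map, PySem.List.mem_pyRange_one, pvSrc]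
  constructor
  · rintro ⟨r', hr', c', hc', p, hp, heq⟩
    obtain ⟨rfl, rfl, rfl, rfl⟩ : r = r' ∧ c = c' ∧ dr = p.1 ∧ dc = p.2 := by
      have h1 := congrArg (·.1) heq
      have h2 := congrArg (·.2.1) heq
      have h3 := congrArg (·.2.2.1) heq
      have h4 := congrArg (·.2.2.2) heq
      simp at h1 h2 h3 h4
      exact ⟨h1.symm, h2.symm, h3.symm, h4.symm⟩
    exact ⟨⟨hr'.1, hr'.2, hc'.1, hc'.2⟩, by simpa using hp⟩
  · rintro ⟨⟨h0, h1, h2, h3⟩, hp⟩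
    exact ⟨r, ⟨h0, h1⟩, c, ⟨h2, h3⟩, (dr, dc), hp, rfl⟩

lemma pvDir_steps (g : List (List String)) (offs : List (Int × Int)) (a b : String) :
    (∃ s ∈ pvSteps g offs, pvEff g s = some (a, b)) ↔ pvDir g offs a b := by
  constructor
  · rintro ⟨s, hm, he⟩
    rw [pvMem_steps] at hm
    exact ⟨s.1, s.2.1, s.2.2.1, s.2.2.2, hm.1, hm.2, he⟩
  · rintro ⟨r, c, dr, dc, hs, hm, he⟩
    exact ⟨(r, c, dr, dc), (pvMem_steps g offs _).2 ⟨hs, hm⟩, he⟩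

-- the 9-offset relation is the symmetrisation of the 4-offset one
lemma pvDir9_iff (g : List (List String)) (a b : String) :
    pvDir g pvOffsets9 a b ↔ pvDir g pvOffsets4 a b ∨ pvDir g pvOffsets4 b a := by
  constructor
  · rintro ⟨r, c, dr, dc, hs, hm, he⟩
    have hz : ¬ (dr = 0 ∧ dc = 0) := by
      intro hq
      unfold pvEff at he
      rw [if_pos (by exact hq)] at he
      exact absurd he (by simp)
    simp only [pvOffsets9, List.mem_cons, List.not_mem_nil, or_false, Prod.mk.injEq] at hm
    rcases hm with ⟨rfl, rfl⟩ | ⟨rfl, rfl⟩ | ⟨rfl, rfl⟩ | ⟨rfl, rfl⟩ | ⟨rfl, rfl⟩ | ⟨rfl, rfl⟩ | ⟨rfl, rfl⟩ | ⟨rfl, rfl⟩ | ⟨rfl, rfl⟩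
    · right
      obtain ⟨hs', he'⟩ := pvEff_swap g r c _ _ a b hs he
      exact ⟨r + (-1), c + (-1), 1, 1, hs', by norm_num [pvOffsets4], by norm_num at he' ⊢; exact he'⟩
    · right
      obtain ⟨hs', he'⟩ := pvEff_swap g r c _ _ a b hs he
      exact ⟨r + (-1), c + 0, 1, 0, hs', by norm_num [pvOffsets4], by norm_num at he' ⊢; exact he'⟩
    · right
      obtain ⟨hs', he'⟩ := pvEff_swap g r c _ _ a b hs he
      exact ⟨r + (-1), c + 1, 1, -1, hs', by norm_num [pvOffsets4], by norm_num at he' ⊢; exact he'⟩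
    · right
      obtain ⟨hs', he'⟩ := pvEff_swap g r c _ _ a b hs he
      exact ⟨r + 0, c + (-1), 0, 1, hs', by norm_num [pvOffsets4], by norm_num at he' ⊢; exact he'⟩
    · exact absurd ⟨rfl, rfl⟩ hz
    · exact Or.inl ⟨r, c, 0, 1, hs, by norm_num [pvOffsets4], he⟩
    · exact Or.inl ⟨r, c, 1, -1, hs, by norm_num [pvOffsets4], he⟩
    · exact Or.inl ⟨r, c, 1, 0, hs, by norm_num [pvOffsets4], he⟩
    · exact Or.inl ⟨r, c, 1, 1, hs, by norm_num [pvOffsets4], he⟩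
  · rintro (⟨r, c, dr, dc, hs, hm, he⟩ | ⟨r, c, dr, dc, hs, hm, he⟩)
    · refine ⟨r, c, dr, dc, hs, ?_, he⟩
      simp only [pvOffsets4, List.mem_cons, List.not_mem_nil, or_false, Prod.mk.injEq] at hm
      rcases hm with ⟨rfl, rfl⟩ | ⟨rfl, rfl⟩ | ⟨rfl, rfl⟩ | ⟨rfl, rfl⟩ <;> norm_num [pvOffsets9]
    · obtain ⟨hs', he'⟩ := pvEff_swap g r c dr dc b a hs he
      refine ⟨r + dr, c + dc, -dr, -dc, hs', ?_, he'⟩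
      simp only [pvOffsets4, List.mem_cons, List.not_mem_nil, or_false, Prod.mk.injEq] at hm
      rcases hm with ⟨rfl, rfl⟩ | ⟨rfl, rfl⟩ | ⟨rfl, rfl⟩ | ⟨rfl, rfl⟩ <;> norm_num [pvOffsets9]

-- sorted(set(v)) depends only on the members of v
lemma pvSortedSet_congr (v w : List String) (h : ∀ x, x ∈ v ↔ x ∈ w) :
    PySem.List.sorted (PySem.Set.ofList v) (fun x => x) =
    PySem.List.sorted (PySem.Set.ofList w) (fun x => x) := by
  apply PySem.List.sorted_eq_of_perm_of_pairwise_lt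
  · calc PySem.List.sorted (PySem.Set.ofList w) (fun x => x) |>.Perm (PySem.Set.ofList w) :=
      PySem.List.sorted_perm _ _ _
    _ |>.Perm (PySem.Set.ofList v) := by
      rw [List.perm_ext_iff_of_nodup (PySem.Set.nodup_ofList w) (PySem.Set.nodup_ofList v)]
      intro x
      rw [PySem.Set.mem_ofList, PySem.Set.mem_ofList, h x]
  · exact PySem.List.sorted_ofList_pairwise_lt w

-- the final characterisation of each side's adjacency dict
lemma pvFinalA (g : List (List String)) :
    pvInvA g ((pvSteps g pvOffsets9).foldl (pvStepA g) (pvReg g, PySem.Set.empty))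
      (fun a b => pvDir g pvOffsets9 a b) := by
  have h0 : pvInvA g (pvReg g, PySem.Set.empty) (fun _ _ => False) := by
    refine ⟨rfl, by simp [PySem.Set.empty], by simp, ?_⟩
    intro k x
    rw [show ((pvReg g, (PySem.Set.empty : PySem.Set (String × String))).1) = pvReg g from rfl]
    simp [pvReg_getD]
  have h1 := pvInvA_foldl g (pvSteps g pvOffsets9) _ _ h0
    (fun s hs => ((pvMem_steps g _ s).1 hs).1)
  apply pvInvA_congr g _ _ _ _ h1
  intro a b
  rw [pvDir_steps]
  tauto

lemma pvFinalB (g : List (List String)) :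
    pvInvB g ((pvSteps g pvOffsets4).foldl (pvStepB g) (pvReg g))
      (fun a b => pvDir g pvOffsets4 a b) := by
  have h0 : pvInvB g (pvReg g) (fun _ _ => False) := by
    refine ⟨rfl, ?_⟩
    intro k x
    simp [pvReg_getD]
  have h1 := pvInvB_foldl g (pvSteps g pvOffsets4) _ _ h0
    (fun s hs => ((pvMem_steps g _ s).1 hs).1)
    (fun s hs => by
      have h := ((pvMem_steps g _ s).1 hs).2
      simp only [pvOffsets4, List.mem_cons, List.not_mem_nil, or_false] at h
      rcases h with h | h | h | h <;> (rw [h]; simp))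
  apply pvInvB_congr g _ _ _ _ h1
  intro a b
  rw [pvDir_steps]
  tauto


-- ===== VERDICT (by name: the statement is the Claim_ definition above) =====
-- the two ports, rewritten through the flattened step lists
lemma pvPortA_eq (g : List (List String)) :
    build_queen_adjacency_ragged g =
    ((pvSteps g pvOffsets9).foldl (pvStepA g) (pvReg g, PySem.Set.empty)).1.items.map
      (fun p => (p.1, PySem.List.sorted (PySem.Set.ofList p.2) (fun x => x))) := by
  rw [pvSteps_foldlA, ← pvRegA_eq g]
  rfl

lemma pvPortB_eq (g : List (List String)) :
    build_queen_adjacency_ragged_alt g =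
    ((pvSteps g pvOffsets4).foldl (pvStepB g) (pvReg g)).items.map
      (fun p => (p.1, PySem.List.sorted (PySem.Set.ofList p.2) (fun x => x))) := by
  rw [pvSteps_foldlB]
  rfl

theorem build_queen_adjacency_ragged_spec : Claim_equal_build_queen_adjacency_ragged := by
  intro g _
  show build_queen_adjacency_ragged g = build_queen_adjacency_ragged_alt g
  obtain ⟨hAk, _, _, hAmem⟩ := pvFinalA g
  obtain ⟨hBk, hBmem⟩ := pvFinalB g
  have hAnodup : ((pvSteps g pvOffsets9).foldl (pvStepA g) (pvReg g, PySem.Set.empty)).1.keys.Nodup := by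
    rw [hAk]; exact pvReg_nodup g
  have hBnodup : ((pvSteps g pvOffsets4).foldl (pvStepB g) (pvReg g)).keys.Nodup := by
    rw [hBk]; exact pvReg_nodup g
  rw [pvPortA_eq g, pvPortB_eq g,
    PySem.Dict.items_eq_map_keys _ hAnodup [], PySem.Dict.items_eq_map_keys _ hBnodup [],
    hAk, hBk, List.map_map, List.map_map]
  apply List.map_congr_left
  intro k _
  simp only [Function.comp]
  refine congrArg (fun v => (k, v)) ?_
  apply pvSortedSet_congr
  intro x
  rw [hAmem k x, hBmem k x]
  simp only [pvDir9_iff]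
  tauto
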